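-- pv_equiv track=rewrite | github.com/baharkh22/Dynamic-Programming | covering_segments_copy.py | optimal_points
-- ===== SOURCE A (Python) =====
-- def optimal_points(segments):
--     Opt=[]
--     pointer=0
--     S=list(segments)
--     b = [el[1] for el in S]
--     c=sorted(b,key=int)
--     for j in c:
--         b = [el[1] for el in S]
--         ind=b.index(j)
--         start=S[ind][0]
--
--         if pointer<start:
--             pointer=j
--             Opt.append(j)
--             del S[ind]
--         else:
--             del S[ind]
--
--     return Opt
-- ===== SOURCE B (Python) =====
-- def optimal_points(segments):
--     Opt = []
--     pointer = 0
--     for seg in sorted(segments, key=lambda s: s[1]):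
--         if pointer < seg[0]:
--             pointer = seg[1]
--             Opt.append(pointer)
--     return Opt
-- ===== Notes on version B (the rewrite author's own statement) =====
-- stated objective: simpler
-- what changed: Replaces A's per-endpoint rescan (rebuilding the endpoint list, list.index lookup and deletion from the remaining segments each iteration) with one stable sort of the segments by right endpoint followed by a single greedy pass keeping only a pointer.
import Mathlib
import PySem

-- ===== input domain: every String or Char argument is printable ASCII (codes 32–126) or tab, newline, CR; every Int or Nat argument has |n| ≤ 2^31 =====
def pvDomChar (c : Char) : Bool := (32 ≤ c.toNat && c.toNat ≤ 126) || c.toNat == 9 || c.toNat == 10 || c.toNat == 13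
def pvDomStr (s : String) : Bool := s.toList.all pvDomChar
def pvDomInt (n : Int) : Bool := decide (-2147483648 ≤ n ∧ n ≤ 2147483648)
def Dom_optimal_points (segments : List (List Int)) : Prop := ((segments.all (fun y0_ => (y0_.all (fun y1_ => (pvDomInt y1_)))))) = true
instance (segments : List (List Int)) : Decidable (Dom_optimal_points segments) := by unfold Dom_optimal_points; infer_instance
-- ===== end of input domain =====

-- B replaces A's endpoint-lookup-and-delete loop by one stable sort of the segments by
-- right endpoint followed by a single greedy pass (objective: simpler).

-- accessors for seg[1] / seg[0]; shared field access only (Pre_ keeps the index in range)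
def pvKey (s : List Int) : Int := PySem.List.pyGetD s 1 0
def pvStart (s : List Int) : Int := PySem.List.pyGetD s 0 0

-- ===== PORT A =====
-- the 'for j in c' loop: state = (remaining endpoints c, remaining segments S, pointer, Opt)
def pvALoop : List Int → List (List Int) → Int → List Int → List Int
  | [], _, _, Opt => Opt
  | j :: c, S, pointer, Opt =>
    let b := S.map pvKey                                -- b = [el[1] for el in S]
    let ind := (PySem.List.index? b j).getD 0           -- ind = b.index(j) (always found)
    let start := pvStart (S.getD ind [])                -- start = S[ind][0]
    if pointer < start then
      pvALoop c (S.eraseIdx ind) j (Opt ++ [j])         -- pointer=j; Opt.append(j); del S[ind]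
    else
      pvALoop c (S.eraseIdx ind) pointer Opt            -- del S[ind]

def optimal_points (segments : List (List Int)) : List Int :=
  let S := segments
  let b := S.map pvKey
  let c := PySem.List.sorted b (fun x => x) false       -- sorted(b, key=int); int is the identity on ints
  pvALoop c S 0 []

-- ===== PORT B =====
def pvBStep (acc : Int × List Int) (seg : List Int) : Int × List Int :=
  if acc.1 < pvStart seg then (pvKey seg, acc.2 ++ [pvKey seg]) else acc

def optimal_points_alt (segments : List (List Int)) : List Int :=
  ((PySem.List.sorted segments pvKey false).foldl pvBStep ((0 : Int), ([] : List Int))).2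

-- ===== PRECONDITION & SPEC =====
-- A evaluates el[1] and el[0] on every segment: a segment shorter than 2 raises IndexError
-- (so does B's key lambda); those inputs are excluded.
def Pre_optimal_points (segments : List (List Int)) : Prop := ∀ s ∈ segments, 2 ≤ s.length
instance (segments : List (List Int)) : Decidable (Pre_optimal_points segments) := by
  unfold Pre_optimal_points; infer_instance

def pvWitness_optimal_points : List (List Int) := [[1, 3], [2, 5], [3, 6]]

def Spec_optimal_points (segments : List (List Int)) (out : List Int) : Prop := out = optimal_points_alt segments
instance (segments : List (List Int)) (out : List Int) : Decidable (Spec_optimal_points segments out) := by unfold Spec_optimal_points; infer_instance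

-- ===== CLAIM (what is proved, stated in full; the proofs are below) =====
def Claim_equal_optimal_points : Prop := ∀ (segments : List (List Int)), Dom_optimal_points segments → Pre_optimal_points segments → Spec_optimal_points segments (optimal_points segments)

-- ===== LEMMAS AND PROOFS =====

-- the insertion predicates of PySem.List.sorted, for key pvKey and for the identity key
def pvBf (a b : List Int) : Bool := decide (pvKey a < pvKey b)
def pvBfI (a b : Int) : Bool := decide (a < b)
def pvIns (acc : List (List Int)) (x : List Int) : List (List Int) := PySem.List.insertBy pvBf x acc
def pvInsI (acc : List Int) (x : Int) : List Int := PySem.List.insertBy pvBfI x acc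

theorem pv_sorted_eq_foldl (S : List (List Int)) :
    PySem.List.sorted S pvKey false = S.foldl pvIns [] :=
  PySem.List.sorted_eq_foldl_insertBy S pvKey

theorem pv_sortedI_eq_foldl (l : List Int) :
    PySem.List.sorted l (fun x => x) false = l.foldl pvInsI [] :=
  PySem.List.sorted_eq_foldl_insertBy l (fun x => x)

theorem pv_ins_skip (x t : List Int) (acc : List (List Int)) (h : ¬ pvKey x < pvKey t) :
    pvIns (t :: acc) x = t :: pvIns acc x := by
  simp [pvIns, PySem.List.insertBy, pvBf, h]

theorem pv_ins_front (t : List Int) (L : List (List Int)) (h : ∀ y ∈ L, pvKey t < pvKey y) :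
    pvIns L t = t :: L := by
  cases L with
  | nil => simp [pvIns, PySem.List.insertBy]
  | cons y ys => simp [pvIns, PySem.List.insertBy, pvBf, h y (by simp)]

theorem pv_foldl_cons (suf : List (List Int)) (t : List Int) :
    ∀ acc, (∀ x ∈ suf, ¬ pvKey x < pvKey t) →
      suf.foldl pvIns (t :: acc) = t :: suf.foldl pvIns acc := by
  induction suf with
  | nil => intro acc _; rfl
  | cons x xs ih =>
    intro acc h
    simp only [List.foldl_cons]
    rw [pv_ins_skip x t acc (h x (by simp))]
    exact ih _ (fun y hy => h y (by simp [hy]))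

-- stable-sort head decomposition, constructive direction
theorem pv_sorted_cons (pre suf : List (List Int)) (t : List Int)
    (hpre : ∀ y ∈ pre, pvKey t < pvKey y)
    (hmin : ∀ y ∈ pre ++ t :: suf, pvKey t ≤ pvKey y) :
    PySem.List.sorted (pre ++ t :: suf) pvKey false =
      t :: PySem.List.sorted (pre ++ suf) pvKey false := by
  have hins : pvIns (pre.foldl pvIns []) t = t :: pre.foldl pvIns [] := by
    apply pv_ins_front
    intro y hy
    apply hpre
    have hy' : y ∈ PySem.List.sorted pre pvKey false := by
      rw [pv_sorted_eq_foldl]; exact hy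
    exact (PySem.List.mem_sorted pre pvKey false y).1 hy'
  rw [pv_sorted_eq_foldl, pv_sorted_eq_foldl, List.foldl_append, List.foldl_append,
    List.foldl_cons, hins]
  exact pv_foldl_cons suf t _ (fun x hx => not_lt.2 (hmin x (by simp [hx])))

-- every nonempty list has a first-minimal-key decomposition
theorem pv_firstMin : ∀ (S : List (List Int)), S ≠ [] →
    ∃ pre t suf, S = pre ++ t :: suf ∧ (∀ y ∈ pre, pvKey t < pvKey y) ∧
      (∀ y ∈ S, pvKey t ≤ pvKey y) := by
  intro S
  induction S with
  | nil => intro h; exact absurd rfl h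
  | cons x rest ih =>
    intro _
    cases rest with
    | nil => exact ⟨[], x, [], by simp, by simp, by simp⟩
    | cons r rs =>
      obtain ⟨pre, t, suf, hdec, hpre, hmin⟩ := ih (by simp)
      by_cases hx : pvKey x ≤ pvKey t
      · refine ⟨[], x, r :: rs, by simp, by simp, ?_⟩
        intro y hy
        rcases List.mem_cons.1 hy with h | h
        · exact le_of_eq (by rw [h])
        · exact le_trans hx (hmin y (by rw [hdec] at h ⊢; exact h))
      · refine ⟨x :: pre, t, suf, by rw [hdec]; rfl, ?_, ?_⟩
        · intro y hy
          rcases List.mem_cons.1 hy with h | h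
          · rw [h]; exact lt_of_not_ge hx
          · exact hpre y h
        · intro y hy
          rcases List.mem_cons.1 hy with h | h
          · rw [h]; exact le_of_lt (lt_of_not_ge hx)
          · exact hmin y (by rw [hdec] at h ⊢; exact h)

-- head decomposition of the stable sort
theorem pv_headDecomp (S : List (List Int)) (t : List Int) (T' : List (List Int))
    (h : PySem.List.sorted S pvKey false = t :: T') :
    ∃ pre suf, S = pre ++ t :: suf ∧ (∀ y ∈ pre, pvKey t < pvKey y) ∧
      PySem.List.sorted (pre ++ suf) pvKey false = T' := by
  have hne : S ≠ [] := by
    intro hS; rw [hS] at h; exact List.cons_ne_nil t T' ((pv_sorted_eq_foldl []).symm.trans h).symm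
  obtain ⟨pre, m, suf, hdec, hpre, hmin⟩ := pv_firstMin S hne
  have h2 := pv_sorted_cons pre suf m hpre (by rw [← hdec]; exact hmin)
  rw [hdec, h2] at h
  obtain ⟨h3, h4⟩ := List.cons.inj h
  exact ⟨pre, suf, by rw [hdec, h3], by rw [h3] at hpre; exact hpre, h4⟩

theorem pv_eraseIdx_append (pre suf : List (List Int)) (t : List Int) :
    (pre ++ t :: suf).eraseIdx pre.length = pre ++ suf := by
  induction pre with
  | nil => rfl
  | cons x xs ih => simp [ih]

theorem pv_getD_append (pre suf : List (List Int)) (t : List Int) :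
    (pre ++ t :: suf).getD pre.length [] = t := by
  induction pre with
  | nil => rfl
  | cons x xs ih => simp

theorem pv_index_append (pre suf : List (List Int)) (t : List Int)
    (hpre : ∀ y ∈ pre, pvKey t < pvKey y) :
    PySem.List.index? ((pre ++ t :: suf).map pvKey) (pvKey t) = some pre.length := by
  rw [PySem.List.index?_eq_some_iff]
  refine ⟨pre.map pvKey, suf.map pvKey, by simp, by simp, ?_⟩
  intro hmem
  obtain ⟨y, hy, hk⟩ := List.mem_map.1 hmem
  exact absurd hk (ne_of_gt (hpre y hy))

-- the identity-key sort of the mapped endpoints is the mapped key-sort of the segments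
theorem pv_map_ins (x : List Int) (L : List (List Int)) :
    (pvIns L x).map pvKey = pvInsI (L.map pvKey) (pvKey x) := by
  induction L with
  | nil => rfl
  | cons y ys ih =>
    by_cases h : pvKey x < pvKey y
    · simp [pvIns, pvInsI, PySem.List.insertBy, pvBf, pvBfI, h]
    · simp only [pvIns, pvInsI] at ih
      simp [pvIns, pvInsI, PySem.List.insertBy, pvBf, pvBfI, h, ih]

theorem pv_map_foldl : ∀ (S : List (List Int)) (acc : List (List Int)),
    (S.foldl pvIns acc).map pvKey = (S.map pvKey).foldl pvInsI (acc.map pvKey) := by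
  intro S
  induction S with
  | nil => intro acc; rfl
  | cons x xs ih =>
    intro acc
    simp only [List.map_cons, List.foldl_cons]
    rw [ih, pv_map_ins]

theorem pv_map_sorted (S : List (List Int)) :
    PySem.List.sorted (S.map pvKey) (fun x => x) false =
      (PySem.List.sorted S pvKey false).map pvKey := by
  rw [pv_sorted_eq_foldl, pv_sortedI_eq_foldl, pv_map_foldl]; rfl

-- main loop equivalence: A's quadratic loop over the sorted endpoints, run against the
-- segment list, equals B's single fold over the stably key-sorted segments
theorem pv_main : ∀ (n : Nat) (S : List (List Int)), S.length ≤ n → ∀ (p : Int) (Opt : List Int),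
    pvALoop ((PySem.List.sorted S pvKey false).map pvKey) S p Opt =
      ((PySem.List.sorted S pvKey false).foldl pvBStep (p, Opt)).2 := by
  intro n
  induction n with
  | zero =>
    intro S hS p Opt
    have : S = [] := List.length_eq_zero_iff.1 (Nat.le_zero.1 hS)
    subst this; rfl
  | succ n ih =>
    intro S hS p Opt
    cases hT : PySem.List.sorted S pvKey false with
    | nil =>
      have : S = [] := (PySem.List.sorted_eq_nil_iff S pvKey false).1 hT
      subst this; rfl
    | cons t T' =>
      obtain ⟨pre, suf, hdec, hpre, hrest⟩ := pv_headDecomp S t T' hT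
      have hlen : (pre ++ suf).length ≤ n := by
        have := hS; rw [hdec] at this; simp at this ⊢; omega
      simp only [List.map_cons, pvALoop]
      rw [hdec, pv_index_append pre suf t hpre]
      simp only [Option.getD_some]
      rw [pv_getD_append, pv_eraseIdx_append]
      rw [List.foldl_cons]
      have hstep : pvBStep (p, Opt) t =
          if p < pvStart t then (pvKey t, Opt ++ [pvKey t]) else (p, Opt) := by
        simp [pvBStep]
      rw [hstep]
      by_cases hc : p < pvStart t
      · rw [if_pos hc, if_pos hc]
        have h5 := ih (pre ++ suf) hlen (pvKey t) (Opt ++ [pvKey t])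
        rw [hrest] at h5
        exact h5
      · rw [if_neg hc, if_neg hc]
        have h5 := ih (pre ++ suf) hlen p Opt
        rw [hrest] at h5
        exact h5

-- ===== VERDICT (by name: the statement is the Claim_ definition above) =====
theorem optimal_points_spec : Claim_equal_optimal_points := by
  intro segments _ _
  unfold Spec_optimal_points optimal_points optimal_points_alt
  simp only []
  rw [pv_map_sorted]
  exact pv_main segments.length segments (le_refl _) 0 []
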